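-- pv_equiv track=rewrite | github.com/laivii/TIRA-24 | Viikko 4/playlists.py | count
-- ===== SOURCE A (Python) =====
-- def count(t):
--         pos = {}
--         a = -1
--         count = 0
--
--         for i, s in enumerate( t ):
--             if s in pos and pos[ s ] >= a:
--                 a = pos[ s ]
--             count += i - a
--             pos[ s ] = i
--
--         return count
-- ===== SOURCE B (Python) =====
-- def count(t):
--     left = 0
--     seen = set()
--     c = 0
--     for right, s in enumerate(t):
--         while s in seen:
--             seen.discard(t[left])
--             left += 1
--         seen.add(s)
--         c += right - left + 1
--     return c
-- ===== Notes on version B (the rewrite author's own statement) =====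
-- stated objective: idiomatic
-- what changed: Replaced the last-occurrence dictionary and boundary index with a two-pointer sliding window over a set: an inner while-loop shrinks the window from the left until the new element is no longer in it, then adds the element and counts right-left+1 subarrays ending at right.
import Mathlib
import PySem

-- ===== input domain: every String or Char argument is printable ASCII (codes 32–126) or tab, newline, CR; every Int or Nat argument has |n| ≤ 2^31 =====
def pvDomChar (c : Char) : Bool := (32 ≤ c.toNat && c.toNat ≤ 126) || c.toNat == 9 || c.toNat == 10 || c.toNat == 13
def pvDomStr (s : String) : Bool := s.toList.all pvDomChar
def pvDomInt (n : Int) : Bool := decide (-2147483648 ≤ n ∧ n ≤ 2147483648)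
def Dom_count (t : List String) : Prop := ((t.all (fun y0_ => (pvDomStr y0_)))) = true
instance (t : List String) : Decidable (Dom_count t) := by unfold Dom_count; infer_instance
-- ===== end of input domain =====

-- B replaces A's last-occurrence dict + boundary index by a two-pointer sliding window
-- (set of window elements, shrink-from-the-left while-loop); same O(n) cost, more idiomatic.

-- ===== PORT A =====
-- one loop iteration of A: state (pos, a, count), element (i, s)
def countStepA (st : PySem.Dict String Int × Int × Int) (p : Int × String) :
    PySem.Dict String Int × Int × Int :=
  let pos := st.1; let a := st.2.1; let c := st.2.2
  let i := p.1; let s := p.2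
  let a :=
    match pos.get? s with          -- 'if s in pos and pos[s] >= a'
    | some v => if a ≤ v then v else a
    | none => a
  let c := c + (i - a)             -- 'count += i - a'
  let pos := pos.insert s i        -- 'pos[s] = i'
  (pos, a, c)

def count (t : List String) : Int :=
  ((PySem.List.enumerate t 0).foldl countStepA (PySem.Dict.empty, -1, 0)).2.2

-- ===== PORT B =====
-- the 'while s in seen: seen.discard(t[left]); left += 1' loop; fuel = len(seen) is an
-- exact bound on its iterations (each pass removes one window element), so this is the loop.
def countShrinkB (t : List String) (s : String) :
    Nat → Int × PySem.Set String → Int × PySem.Set String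
  | 0, st => st
  | fuel + 1, (left, seen) =>
    if PySem.Set.contains seen s then
      -- t[left]: on every state reached from count_alt, 0 ≤ left < len(t) (proved below), so exact
      let seen := PySem.Set.discard seen ((PySem.List.pyGet? t left).getD "")
      countShrinkB t s fuel (left + 1, seen)
    else (left, seen)

def countStepB (t : List String) (st : Int × PySem.Set String × Int) (p : Int × String) :
    Int × PySem.Set String × Int :=
  let ls := countShrinkB t p.2 st.2.1.length (st.1, st.2.1)
  let left := ls.1
  let seen := PySem.Set.add ls.2 p.2   -- 'seen.add(s)'
  (left, seen, st.2.2 + (p.1 - left + 1))  -- 'c += right - left + 1'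

def count_alt (t : List String) : Int :=
  ((PySem.List.enumerate t 0).foldl (countStepB t) (0, PySem.Set.empty, 0)).2.2

-- ===== PRECONDITION & SPEC =====
def Spec_count (t : List String) (out : Int) : Prop := out = count_alt t
instance (t : List String) (out : Int) : Decidable (Spec_count t out) := by unfold Spec_count; infer_instance

-- ===== CLAIM (what is proved, stated in full; the proofs are below) =====
def Claim_equal_count : Prop := ∀ (t : List String), Dom_count t → Spec_count t (count t)

-- ===== LEMMAS AND PROOFS =====

-- index of the LAST occurrence of s in p (proof-side notion only)
def lastN? : List String → String → Option Nat
  | [], _ => none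
  | x :: xs, s =>
    match lastN? xs s with
    | some j => some (j + 1)
    | none => if x = s then some 0 else none

theorem lastN?_append (p : List String) (x s : String) :
    lastN? (p ++ [x]) s = if x = s then some p.length else lastN? p s := by
  induction p with
  | nil => by_cases hx : x = s <;> simp [lastN?, hx]
  | cons y ys ih =>
    by_cases hx : x = s
    · simp only [hx] at ih ⊢
      simp [List.cons_append, lastN?, ih]
    · simp only [if_neg hx] at ih ⊢
      simp [List.cons_append, lastN?, ih]

theorem lastN?_eq_none_iff (p : List String) (s : String) : lastN? p s = none ↔ s ∉ p := by
  induction p with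
  | nil => simp [lastN?]
  | cons x xs ih =>
    simp only [lastN?, List.mem_cons]
    cases h : lastN? xs s with
    | some j =>
      have hm : s ∈ xs := by
        by_contra hn; rw [ih.mpr hn] at h; cases h
      simp [hm]
    | none =>
      have hn : s ∉ xs := ih.mp h
      by_cases hx : x = s
      · simp [hx, hn]
      · have hsx : s ≠ x := fun hh => hx hh.symm
        simp [hx, hn, hsx]

theorem lastN?_spec (p : List String) (s : String) (j : Nat) (h : lastN? p s = some j) :
    j < p.length ∧ s ∉ p.drop (j + 1) := by
  induction p generalizing j with
  | nil => cases h
  | cons x xs ih =>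
    simp only [lastN?] at h
    cases hx : lastN? xs s with
    | some j' =>
      rw [hx] at h
      injection h with h; subst h
      obtain ⟨h1, h2⟩ := ih j' hx
      exact ⟨Nat.succ_lt_succ h1, by simpa using h2⟩
    | none =>
      rw [hx] at h
      by_cases hxs : x = s
      · rw [if_pos hxs] at h; injection h with h; subst h
        exact ⟨by simp, by simpa using (lastN?_eq_none_iff xs s).mp hx⟩
      · rw [if_neg hxs] at h; cases h

theorem lastN?_getElem (p : List String) (s : String) (j : Nat) (h : lastN? p s = some j)
    (hj : j < p.length) : p[j] = s := by
  induction p generalizing j with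
  | nil => cases h
  | cons x xs ih =>
    simp only [lastN?] at h
    cases hx : lastN? xs s with
    | some j' =>
      rw [hx] at h; injection h with h; subst h
      simpa using ih j' hx (lastN?_spec xs s j' hx).1
    | none =>
      rw [hx] at h
      by_cases hxs : x = s
      · rw [if_pos hxs] at h; injection h with h; subst h; simpa using hxs
      · rw [if_neg hxs] at h; cases h

theorem mem_drop_iff_lastN? (p : List String) (s : String) (k : Nat) :
    s ∈ p.drop k ↔ ∃ j, lastN? p s = some j ∧ k ≤ j := by
  constructor
  · intro hm
    cases h : lastN? p s with
    | none => exact absurd (List.mem_of_mem_drop hm) ((lastN?_eq_none_iff p s).mp h)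
    | some j =>
      refine ⟨j, rfl, ?_⟩
      by_contra hlt
      have h2 : s ∈ p.drop (j + 1) := by
        have hd : p.drop k = (p.drop (j + 1)).drop (k - (j + 1)) := by
          rw [List.drop_drop]; congr 1; omega
        exact List.mem_of_mem_drop (hd ▸ hm)
      exact (lastN?_spec p s j h).2 h2
  · rintro ⟨j, hj, hkj⟩
    have hlt := (lastN?_spec p s j hj).1
    have hget := lastN?_getElem p s j hj hlt
    have hidx : (p.drop k)[j - k]'(by simp; omega) = s := by
      rw [List.getElem_drop]
      simp only [show k + (j - k) = j by omega]
      exact hget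
    exact hidx ▸ List.getElem_mem _

-- the shrink loop computed on a window p.drop l of a prefix p of t
theorem countShrinkB_spec (t p : List String) (hp : p <+: t) (s : String) :
    ∀ (n l : Nat), n = (p.drop l).length → (p.drop l).Nodup →
    countShrinkB t s n ((l : Int), p.drop l) =
      (match lastN? p s with
       | some j => if l ≤ j then (((j + 1 : Nat) : Int)) else (l : Int)
       | none => (l : Int),
       match lastN? p s with
       | some j => if l ≤ j then p.drop (j + 1) else p.drop l
       | none => p.drop l) := by
  intro n
  induction n with
  | zero =>
    intro l hn _
    have hle : p.length ≤ l := by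
      rw [List.length_drop] at hn; omega
    simp only [countShrinkB]
    cases hj : lastN? p s with
    | none => rfl
    | some j =>
      have := (lastN?_spec p s j hj).1
      dsimp only
      rw [if_neg (by omega), if_neg (by omega)]
  | succ n ih =>
    intro l hn hnd
    have hl : l < p.length := by
      rw [List.length_drop] at hn; omega
    by_cases hmem : s ∈ p.drop l
    · -- while-condition true: discard t[left] and recurse
      have hcon : PySem.Set.contains (p.drop l) s = true :=
        (PySem.Set.contains_iff _ _).mpr hmem
      have hlt : l < t.length := lt_of_lt_of_le hl hp.length_le
      have hget : (PySem.List.pyGet? t ((l : Nat) : Int)).getD "" = p[l] := by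
        rw [PySem.List.pyGet?_natCast, List.getElem?_eq_getElem hlt]
        exact (hp.getElem hl).symm
      have hcons : p.drop l = p[l] :: p.drop (l + 1) := List.drop_eq_getElem_cons hl
      have hnotmem : p[l] ∉ p.drop (l + 1) := by
        rw [hcons] at hnd; exact (List.nodup_cons.mp hnd).1
      have hdisc : PySem.Set.discard (p.drop l) p[l] = p.drop (l + 1) := by
        rw [hcons]
        simp only [PySem.Set.discard, List.filter_cons, BEq.refl, Bool.not_true]
        exact List.filter_eq_self.mpr (fun y hy => by
          simp only [Bool.not_eq_true', beq_eq_false_iff_ne, ne_eq]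
          exact fun he => hnotmem (he ▸ hy : p[l] ∈ p.drop (l + 1)))
      have hrec := ih (l + 1)
        (by rw [List.length_drop] at hn ⊢; omega)
        (by rw [hcons] at hnd; exact (List.nodup_cons.mp hnd).2)
      simp only [countShrinkB, hcon, if_pos, hget, hdisc]
      have hcast : ((l : Int) + 1) = (((l + 1 : Nat)) : Int) := by push_cast; ring
      rw [hcast, hrec]
      obtain ⟨j, hj, hlj⟩ := (mem_drop_iff_lastN? p s l).mp hmem
      rw [hj]
      dsimp only
      rcases Nat.lt_or_ge l j with h1 | h1
      · rw [if_pos (by omega), if_pos (by omega), if_pos (by omega), if_pos (by omega)]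
      · have : j = l := by omega
        subst this
        rw [if_neg (by omega), if_neg (by omega), if_pos (by omega), if_pos (by omega)]
    · -- while-condition false: return unchanged
      have hcon : PySem.Set.contains (p.drop l) s = false := by
        rw [← Bool.not_eq_true, PySem.Set.contains_iff]; exact hmem
      simp only [countShrinkB, hcon, Bool.false_eq_true, if_false]
      cases hj : lastN? p s with
      | none => rfl
      | some j =>
        have : ¬ l ≤ j := fun hle =>
          hmem ((mem_drop_iff_lastN? p s l).mpr ⟨j, hj, hle⟩)
        dsimp only
        rw [if_neg this, if_neg this]

set_option maxHeartbeats 1000000 in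
-- the joint loop invariant: A's state is (last-occurrence map, window start - 1, c),
-- B's state is (window start, the window itself, c), over any processed prefix p of t
theorem fold_inv (t : List String) :
    ∀ p : List String, p <+: t →
    ∃ (pos : PySem.Dict String Int) (c : Int) (ln : Nat),
      ln ≤ p.length ∧ (p.drop ln).Nodup ∧
      (∀ s, pos.get? s = (lastN? p s).map (fun j : Nat => (j : Int))) ∧
      (PySem.List.enumerate p 0).foldl countStepA (PySem.Dict.empty, -1, 0)
        = (pos, (ln : Int) - 1, c) ∧
      (PySem.List.enumerate p 0).foldl (countStepB t) (0, PySem.Set.empty, 0)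
        = ((ln : Int), p.drop ln, c) := by
  intro p
  induction p using List.reverseRecOn with
  | nil =>
    intro _
    refine ⟨PySem.Dict.empty, 0, 0, by simp, by simp, fun s => rfl, ?_, ?_⟩
    · norm_num [PySem.List.enumerate_nil]
    · norm_num [PySem.List.enumerate_nil, PySem.Set.empty]
  | append_singleton p x ih =>
    intro hp
    have hp' : p <+: t := (List.prefix_append p [x]).trans hp
    obtain ⟨pos, c, ln, hln, hnd, hpos, hA, hB⟩ := ih hp'
    obtain ⟨ln', hle, hnot, hshr, ha'⟩ :
        ∃ ln' : Nat, (ln ≤ ln' ∧ ln' ≤ p.length) ∧ x ∉ p.drop ln' ∧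
          countShrinkB t x (p.drop ln).length ((ln : Int), p.drop ln)
            = ((ln' : Int), p.drop ln') ∧
          (match pos.get? x with
            | some v => if (ln : Int) - 1 ≤ v then v else (ln : Int) - 1
            | none => (ln : Int) - 1) = (ln' : Int) - 1 := by
      rw [hpos x, countShrinkB_spec t p hp' x _ ln rfl hnd]
      cases hj : lastN? p x with
      | none =>
        refine ⟨ln, ⟨le_refl _, hln⟩, ?_, rfl, rfl⟩
        exact fun hm => ((lastN?_eq_none_iff p x).mp hj) (List.mem_of_mem_drop hm)
      | some j =>
        obtain ⟨hjlt, hjnot⟩ := lastN?_spec p x j hj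
        rcases Nat.lt_or_ge j ln with h1 | h1
        · refine ⟨ln, ⟨le_refl _, hln⟩, ?_,
            by dsimp only; rw [if_neg (by omega), if_neg (by omega)], ?_⟩
          · intro hm
            obtain ⟨j2, hj2, hlej⟩ := (mem_drop_iff_lastN? p x ln).mp hm
            rw [hj] at hj2; injection hj2 with hj2; omega
          · simp only [Option.map_some]
            by_cases hc : (ln : Int) - 1 ≤ (j : Int)
            · rw [if_pos hc]; omega
            · rw [if_neg hc]
        · refine ⟨j + 1, ⟨by omega, by omega⟩, hjnot,
            by dsimp only; rw [if_pos h1, if_pos h1], ?_⟩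
          simp only [Option.map_some]
          rw [if_pos (by omega : (ln : Int) - 1 ≤ (j : Int))]
          push_cast; ring
    have hdropapp : (p ++ [x]).drop ln' = p.drop ln' ++ [x] :=
      List.drop_append_of_le_length hle.2
    have hnd' : (p.drop ln').Nodup := by
      have hdd : p.drop ln' = (p.drop ln).drop (ln' - ln) := by
        rw [List.drop_drop]; congr 1; omega
      rw [hdd]; exact hnd.sublist (List.drop_sublist _ _)
    refine ⟨pos.insert x ((p.length : Nat) : Int),
      c + (((p.length : Nat) : Int) - ((ln' : Int) - 1)), ln', ?_, ?_, ?_, ?_, ?_⟩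
    · simp only [List.length_append, List.length_cons, List.length_nil]; omega
    · rw [hdropapp]
      refine List.Nodup.append hnd' (List.nodup_singleton x) ?_
      intro a ha hb
      simp only [List.mem_singleton] at hb
      subst hb
      exact hnot ha
    · intro s
      rw [PySem.Dict.get?_insert, lastN?_append]
      by_cases hsx : s = x
      · subst hsx; rw [if_pos rfl, if_pos rfl]; simp
      · rw [if_neg hsx, if_neg (fun hh => hsx hh.symm), hpos s]
    · rw [PySem.List.enumerate_append, List.foldl_append, hA,
        PySem.List.enumerate_cons, PySem.List.enumerate_nil]
      simp only [List.foldl_cons, List.foldl_nil, countStepA, zero_add]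
      rw [ha']
    · rw [PySem.List.enumerate_append, List.foldl_append, hB,
        PySem.List.enumerate_cons, PySem.List.enumerate_nil]
      simp only [List.foldl_cons, List.foldl_nil, countStepB, zero_add]
      rw [hshr, PySem.Set.add_of_not_mem hnot, hdropapp]
      refine congrArg (Prod.mk _) ?_
      refine congrArg (Prod.mk _) ?_
      ring

-- ===== VERDICT (by name: the statement is the Claim_ definition above) =====
theorem count_spec : Claim_equal_count := by
  intro t _
  unfold Spec_count count count_alt
  obtain ⟨pos, c, ln, _, _, _, hA, hB⟩ := fold_inv t t (List.prefix_refl t)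
  rw [hA, hB]
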